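-- pv_equiv track=rewrite | github.com/chaechef/algorithm | boj/BFS/12100.py | hap
-- ===== SOURCE A (Python) =====
-- def hap(arr: [int], direct: bool):
--     # 참이면 오른
--     a = list(filter(lambda x: x != 0, arr))
--
--     if direct:
--         idx = len(a) - 1
--         while idx > 0:
--             if a[idx] == a[idx - 1]:
--                 a[idx] *= 2
--                 a[idx - 1] = 0
--                 idx -= 2
--             else:
--                 idx -= 1
--         a = list(filter(lambda x: x != 0, a))
--
--         a = [0] * (len(arr) - len(a)) + a
--     else:
--         idx = 0
--         while idx < len(a) - 1:
--             if a[idx] == a[idx + 1]: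
--                 a[idx] *= 2
--                 a[idx + 1] = 0
--                 idx += 2
--             else:
--                 idx += 1
--         a = list(filter(lambda x: x != 0, a))
--         a = a + [0] * (len(arr) - len(a))
--
--     return a
-- ===== SOURCE B (Python) =====
-- def hap(arr, direct):
--     # Compress nonzeros, always merge left-to-right over a single fold with a
--     # once-per-tile merge flag; reverse around the fold for the right direction.
--     a = [x for x in arr if x != 0]
--     if direct:
--         a.reverse()
--     out = []
--     merged = False
--     for x in a:
--         if out and out[-1] == x and not merged:
--             out[-1] = x * 2
--             merged = True
--         else:
--             out.append(x)
--             merged = False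
--     if direct:
--         out.reverse()
--         return [0] * (len(arr) - len(out)) + out
--     return out + [0] * (len(arr) - len(out))
-- ===== Notes on version B (the rewrite author's own statement) =====
-- stated objective: simpler
-- what changed: A runs two mirror-image index while-loops that mark merged tiles with in-place zeros and re-filter the list; B reverses once for the right direction and does a single forward fold with a once-per-merge flag, building the output list directly.
import Mathlib
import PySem

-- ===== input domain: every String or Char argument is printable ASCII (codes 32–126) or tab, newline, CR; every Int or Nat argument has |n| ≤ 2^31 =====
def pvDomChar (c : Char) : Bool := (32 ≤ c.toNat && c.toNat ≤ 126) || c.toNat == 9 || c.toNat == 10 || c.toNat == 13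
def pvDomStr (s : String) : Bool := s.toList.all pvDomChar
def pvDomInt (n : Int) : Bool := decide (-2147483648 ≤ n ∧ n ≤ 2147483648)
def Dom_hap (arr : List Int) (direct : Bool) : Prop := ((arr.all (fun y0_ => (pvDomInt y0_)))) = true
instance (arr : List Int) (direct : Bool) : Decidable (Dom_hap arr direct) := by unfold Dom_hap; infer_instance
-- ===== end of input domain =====

-- B replaces A's two mirror index-loops (merge marked by in-place zeros, then re-filter)
-- by one forward fold with a once-per-merge flag, reversing around it for the right direction.

-- ===== PORT A =====
-- A's left while-loop (direct=False): idx only increases; indices are always in range,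
-- so pyGetD/pySetD are exact here.
def hapLoopL (a : List Int) (idx : Nat) : List Int :=
  if idx < a.length - 1 then
    if PySem.List.pyGetD a (idx : Int) 0 = PySem.List.pyGetD a ((idx : Int) + 1) 0 then
      hapLoopL (PySem.List.pySetD
                  (PySem.List.pySetD a (idx : Int) (PySem.List.pyGetD a (idx : Int) 0 * 2))
                  ((idx : Int) + 1) 0) (idx + 2)
    else hapLoopL a (idx + 1)
  else a
termination_by a.length - idx
decreasing_by all_goals simp_all [PySem.List.pySetD_natCast]; omega

-- A's right while-loop (direct=True): idx decreases, may end at -1; in-range while idx > 0.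
def hapLoopR (a : List Int) (idx : Int) : List Int :=
  if h : idx > 0 then
    if PySem.List.pyGetD a idx 0 = PySem.List.pyGetD a (idx - 1) 0 then
      hapLoopR (PySem.List.pySetD
                  (PySem.List.pySetD a idx (PySem.List.pyGetD a idx 0 * 2))
                  (idx - 1) 0) (idx - 2)
    else hapLoopR a (idx - 1)
  else a
termination_by idx.toNat
decreasing_by all_goals omega

def hap (arr : List Int) (direct : Bool) : List Int :=
  let a := arr.filter (· != 0)
  if direct then
    let a1 := hapLoopR a ((a.length : Int) - 1)
    let a2 := a1.filter (· != 0)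
    List.replicate (arr.length - a2.length) 0 ++ a2
  else
    let a1 := hapLoopL a 0
    let a2 := a1.filter (· != 0)
    a2 ++ List.replicate (arr.length - a2.length) 0

-- ===== PORT B =====
-- fold step; `out` is kept in reversed order (head = Python's out[-1])
def hapStep (st : List Int × Bool) (x : Int) : List Int × Bool :=
  match st with
  | (h :: t, merged) => if h = x ∧ merged = false then (x * 2 :: t, true) else (x :: h :: t, false)
  | ([], _) => ([x], false)

def hap_alt (arr : List Int) (direct : Bool) : List Int :=
  let a0 := arr.filter (· != 0)
  let a := if direct then a0.reverse else a0
  let st := a.foldl hapStep ([], false)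
  let out := st.1.reverse
  if direct then
    let res := out.reverse
    List.replicate (arr.length - res.length) 0 ++ res
  else
    out ++ List.replicate (arr.length - out.length) 0

-- ===== PRECONDITION & SPEC =====
def Spec_hap (arr : List Int) (direct : Bool) (out : List Int) : Prop := out = hap_alt arr direct
instance (arr : List Int) (direct : Bool) (out : List Int) : Decidable (Spec_hap arr direct out) := by unfold Spec_hap; infer_instance

-- ===== CLAIM (what is proved, stated in full; the proofs are below) =====
def Claim_equal_hap : Prop := ∀ (arr : List Int) (direct : Bool), Dom_hap arr direct → Spec_hap arr direct (hap arr direct)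

-- ===== LEMMAS AND PROOFS =====

-- the canonical merged row (no zero markers)
def hapMrg : List Int → List Int
  | [] => []
  | [x] => [x]
  | x :: y :: t => if x = y then x * 2 :: hapMrg t else x :: hapMrg (y :: t)

-- the merged row with A's in-place zero markers
def hapFz : List Int → List Int
  | [] => []
  | [x] => [x]
  | x :: y :: t => if x = y then x * 2 :: 0 :: hapFz t else x :: hapFz (y :: t)

theorem filter_hapFz (s : List Int) (h : ∀ x ∈ s, x ≠ 0) :
    (hapFz s).filter (· != 0) = hapMrg s := by
  induction s using hapFz.induct with
  | case1 => simp [hapFz, hapMrg]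
  | case2 x => simp_all [hapFz, hapMrg, List.filter]
  | case3 y t ih =>
      have hy : y ≠ 0 := h y (by simp)
      simp_all [hapFz, hapMrg]
  | case4 x y t hxy ih =>
      have hx : x ≠ 0 := h x (by simp)
      have : ∀ z ∈ y :: t, z ≠ 0 := fun z hz => h z (by simp_all)
      simp_all [hapFz, hapMrg, List.filter]

theorem set_append_len (p l : List Int) (x v : Int) :
    (p ++ x :: l).set p.length v = p ++ v :: l := by
  induction p with
  | nil => simp
  | cons a p ih => simp [List.set, ih]

theorem getD_append_len (p l : List Int) (x d : Int) :
    (p ++ x :: l).getD p.length d = x := by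
  simp [List.getD, List.getElem?_append_right]

theorem hapLoopL_spec (s p : List Int) :
    hapLoopL (p ++ s) p.length = p ++ hapFz s := by
  induction s using hapFz.induct generalizing p with
  | case1 => rw [hapLoopL]; simp [hapFz]
  | case2 x => rw [hapLoopL]; simp [hapFz]
  | case3 y t ih =>
      rw [hapLoopL]
      have hc : p.length < (p ++ y :: y :: t).length - 1 := by simp only [List.length_append, List.length_cons]; omega
      have g1 : PySem.List.pyGetD (p ++ y :: y :: t) (p.length : Int) 0 = y := by
        simp [PySem.List.pyGetD_natCast, getD_append_len]
      have g2 : PySem.List.pyGetD (p ++ y :: y :: t) ((p.length : Int) + 1) 0 = y := by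
        have : ((p.length : Int) + 1) = (((p.length + 1 : Nat)) : Int) := by omega
        rw [this, PySem.List.pyGetD_natCast]
        have := getD_append_len (p ++ [y]) t y 0
        simpa using this
      rw [if_pos hc, g1, g2, if_pos rfl]
      have s1 : PySem.List.pySetD (p ++ y :: y :: t) (p.length : Int) (y * 2)
          = p ++ y * 2 :: y :: t := by
        simp [PySem.List.pySetD_natCast, set_append_len]
      have s2 : PySem.List.pySetD (p ++ y * 2 :: y :: t) ((p.length : Int) + 1) 0
          = p ++ y * 2 :: 0 :: t := by
        have hcast : ((p.length : Int) + 1) = (((p.length + 1 : Nat)) : Int) := by omega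
        rw [hcast, PySem.List.pySetD_natCast]
        have := set_append_len (p ++ [y * 2]) t y 0
        simpa using this
      rw [s1, s2]
      have hlen : p.length + 2 = (p ++ [y * 2, 0]).length := by simp
      have := ih (p ++ [y * 2, 0])
      simp only [List.append_assoc] at this
      rw [hlen]
      simpa [hapFz] using this
  | case4 x y t hxy ih =>
      rw [hapLoopL]
      have hc : p.length < (p ++ x :: y :: t).length - 1 := by simp only [List.length_append, List.length_cons]; omega
      have g1 : PySem.List.pyGetD (p ++ x :: y :: t) (p.length : Int) 0 = x := by
        simp [PySem.List.pyGetD_natCast, getD_append_len]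
      have g2 : PySem.List.pyGetD (p ++ x :: y :: t) ((p.length : Int) + 1) 0 = y := by
        have : ((p.length : Int) + 1) = (((p.length + 1 : Nat)) : Int) := by omega
        rw [this, PySem.List.pyGetD_natCast]
        have := getD_append_len (p ++ [x]) t y 0
        simpa using this
      rw [if_pos hc, g1, g2, if_neg hxy]
      have hlen : p.length + 1 = (p ++ [x]).length := by simp
      have := ih (p ++ [x])
      simp only [List.append_assoc] at this
      rw [hlen]
      simpa [hapFz, hxy] using this

theorem hapLoopR_spec (r s : List Int) :
    hapLoopR (r.reverse ++ s) ((r.length : Int) - 1) = (hapFz r).reverse ++ s := by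
  induction r using hapFz.induct generalizing s with
  | case1 => rw [hapLoopR]; simp [hapFz]
  | case2 x => rw [hapLoopR]; simp [hapFz]
  | case3 y t ih =>
      rw [hapLoopR]
      have hidx : (((y :: y :: t).length : Int) - 1) = (((t.length + 1 : Nat)) : Int) := by
        simp only [List.length_cons]; omega
      have hrev : (y :: y :: t).reverse ++ s = (t.reverse ++ [y]) ++ y :: s := by simp
      have hlen : (t.reverse ++ [y]).length = t.length + 1 := by simp
      have g1 : PySem.List.pyGetD ((y :: y :: t).reverse ++ s) (((y :: y :: t).length : Int) - 1) 0 = y := by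
        rw [hidx, PySem.List.pyGetD_natCast, hrev, ← hlen, getD_append_len]
      have g2 : PySem.List.pyGetD ((y :: y :: t).reverse ++ s) ((((y :: y :: t).length : Int) - 1) - 1) 0 = y := by
        have : ((((y :: y :: t).length : Int) - 1) - 1) = ((t.length : Nat) : Int) := by simp only [List.length_cons]; omega
        rw [this, PySem.List.pyGetD_natCast]
        have : t.reverse ++ [y] ++ y :: s = t.reverse ++ y :: (y :: s) := by simp
        rw [hrev, this]
        have := getD_append_len t.reverse (y :: s) y 0
        simpa using this
      rw [dif_pos (by simp only [List.length_cons]; omega), g1, g2, if_pos rfl]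
      have s1 : PySem.List.pySetD ((y :: y :: t).reverse ++ s) (((y :: y :: t).length : Int) - 1) (y * 2)
          = t.reverse ++ y :: y * 2 :: s := by
        rw [hidx, PySem.List.pySetD_natCast, hrev, ← hlen, set_append_len]
        simp
      have s2 : PySem.List.pySetD (t.reverse ++ y :: y * 2 :: s) ((((y :: y :: t).length : Int) - 1) - 1) 0
          = t.reverse ++ 0 :: y * 2 :: s := by
        have : ((((y :: y :: t).length : Int) - 1) - 1) = ((t.length : Nat) : Int) := by simp only [List.length_cons]; omega
        rw [this, PySem.List.pySetD_natCast]
        have := set_append_len t.reverse (y * 2 :: s) y 0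
        simpa using this
      rw [s1, s2]
      have hidx2 : (((y :: y :: t).length : Int) - 1) - 2 = ((t.length : Int) - 1) := by simp only [List.length_cons]; omega
      have := ih (0 :: y * 2 :: s)
      rw [hidx2]
      simpa [hapFz] using this
  | case4 x y t hxy ih =>
      rw [hapLoopR]
      have hidx : (((x :: y :: t).length : Int) - 1) = (((t.length + 1 : Nat)) : Int) := by
        simp only [List.length_cons]; omega
      have hrev : (x :: y :: t).reverse ++ s = (t.reverse ++ [y]) ++ x :: s := by simp
      have hlen : (t.reverse ++ [y]).length = t.length + 1 := by simp
      have g1 : PySem.List.pyGetD ((x :: y :: t).reverse ++ s) (((x :: y :: t).length : Int) - 1) 0 = x := by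
        rw [hidx, PySem.List.pyGetD_natCast, hrev, ← hlen, getD_append_len]
      have g2 : PySem.List.pyGetD ((x :: y :: t).reverse ++ s) ((((x :: y :: t).length : Int) - 1) - 1) 0 = y := by
        have : ((((x :: y :: t).length : Int) - 1) - 1) = ((t.length : Nat) : Int) := by simp only [List.length_cons]; omega
        rw [this, PySem.List.pyGetD_natCast]
        have h2 : t.reverse ++ [y] ++ x :: s = t.reverse ++ y :: (x :: s) := by simp
        rw [hrev, h2]
        have := getD_append_len t.reverse (x :: s) y 0
        simpa using this
      rw [dif_pos (by simp only [List.length_cons]; omega), g1, g2, if_neg hxy]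
      have hidx2 : (((x :: y :: t).length : Int) - 1) - 1 = (((y :: t).length : Int) - 1) := by simp only [List.length_cons]; omega
      have := ih (x :: s)
      rw [hidx2, hrev]
      have h3 : (t.reverse ++ [y]) ++ x :: s = (y :: t).reverse ++ x :: s := by simp
      rw [h3]
      simpa [hapFz, hxy] using this

theorem hapStep_merge (h : Int) (t : List Int) (x : Int) (hx : h = x) :
    hapStep (h :: t, false) x = (x * 2 :: t, true) := by simp [hapStep, hx]

theorem hapStep_app (h : Int) (t : List Int) (x : Int) (hx : ¬ h = x) :
    hapStep (h :: t, false) x = (x :: h :: t, false) := by simp [hapStep, hx]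

theorem hapStep_true (s : List Int) (x : Int) :
    hapStep (s, true) x = (x :: s, false) := by cases s <;> simp [hapStep]

theorem hapStep_fold (xs : List Int) :
    (∀ h t, (xs.foldl hapStep (h :: t, false)).1 = (hapMrg (h :: xs)).reverse ++ t) ∧
    (∀ s, (xs.foldl hapStep (s, true)).1 = (hapMrg xs).reverse ++ s) := by
  induction xs with
  | nil => simp [hapMrg]
  | cons x xs ih =>
      constructor
      · intro h t
        by_cases hx : h = x
        · rw [List.foldl_cons, hapStep_merge h t x hx, ih.2]
          simp [hapMrg, hx]
        · rw [List.foldl_cons, hapStep_app h t x hx, ih.1]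
          simp [hapMrg, hx]
      · intro s
        rw [List.foldl_cons, hapStep_true, ih.1]

theorem hapStep_foldAll (l : List Int) :
    (l.foldl hapStep ([], false)).1 = (hapMrg l).reverse := by
  cases l with
  | nil => simp [hapMrg]
  | cons h t =>
      have h0 : hapStep ([], false) h = ([h], false) := by simp [hapStep]
      rw [List.foldl_cons, h0, (hapStep_fold t).1 h []]
      simp

theorem filter_nonzero (arr : List Int) : ∀ x ∈ arr.filter (· != 0), x ≠ 0 := by
  intro x hx
  have := List.of_mem_filter hx
  simpa using this

-- ===== VERDICT (by name: the statement is the Claim_ definition above) =====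
theorem hap_spec : Claim_equal_hap := by
  intro arr direct _
  unfold Spec_hap hap hap_alt
  set a := arr.filter (· != 0) with ha
  cases direct with
  | false =>
      simp only [Bool.false_eq_true, if_false]
      have hl : hapLoopL a 0 = hapFz a := by
        have := hapLoopL_spec a []
        simpa using this
      rw [hl, filter_hapFz a (filter_nonzero arr), hapStep_foldAll]
      simp
  | true =>
      simp only [if_true]
      have hl : hapLoopR a ((a.length : Int) - 1) = (hapFz a.reverse).reverse := by
        have := hapLoopR_spec a.reverse []
        simpa using this
      rw [hl, hapStep_foldAll]
      have hf : ((hapFz a.reverse).reverse).filter (· != 0)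
          = (hapMrg a.reverse).reverse := by
        rw [List.filter_reverse, filter_hapFz a.reverse (by
          intro x hx; exact filter_nonzero arr x (List.mem_reverse.mp hx))]
      rw [hf]
      simp
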